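-- pv_equiv track=rewrite | github.com/xtofuub/openrecon-ios | skills/hunting-for-persistence-via-wmi-subscriptions/scripts/agent.py | parse_wmic_list
-- ===== SOURCE A (Python) =====
-- def parse_wmic_list(output):
--     """Parse WMIC /format:list output into list of dicts."""
--     entries = []
--     current = {}
--     for line in output.strip().split("\n"):
--         line = line.strip()
--         if not line:
--             if current:
--                 entries.append(current)
--                 current = {}
--             continue
--         if "=" in line:
--             key, _, value = line.partition("=")
--             current[key.strip()] = value.strip()
--     if current:
--         entries.append(current)
--     return entries
-- ===== SOURCE B (Python) =====
-- def parse_wmic_list(output):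
--     """Parse WMIC /format:list output into list of dicts."""
--     lines = [raw.strip() for raw in output.strip().split("\n")]
--     # phase 1: partition the stripped lines into blocks separated by blank lines
--     blocks = []
--     block = []
--     for line in lines:
--         if line:
--             block.append(line)
--         else:
--             blocks.append(block)
--             block = []
--     blocks.append(block)
--     # phase 2: map each block to a dict from its '=' lines; keep non-empty dicts
--     entries = []
--     for block in blocks:
--         entry = {}
--         for line in block:
--             if "=" in line:
--                 key, _, value = line.partition("=")
--                 entry[key.strip()] = value.strip()
--         if entry:
--             entries.append(entry)
--     return entries
-- ===== Notes on version B (the rewrite author's own statement) =====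
-- stated objective: alternative
-- what changed: Replaces A's single fused loop with mutable (entries, current-dict) accumulator state by a two-phase pipeline: first partition the stripped lines into blank-line-separated blocks, then map each block independently to a dict and keep the non-empty ones.
import Mathlib
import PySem

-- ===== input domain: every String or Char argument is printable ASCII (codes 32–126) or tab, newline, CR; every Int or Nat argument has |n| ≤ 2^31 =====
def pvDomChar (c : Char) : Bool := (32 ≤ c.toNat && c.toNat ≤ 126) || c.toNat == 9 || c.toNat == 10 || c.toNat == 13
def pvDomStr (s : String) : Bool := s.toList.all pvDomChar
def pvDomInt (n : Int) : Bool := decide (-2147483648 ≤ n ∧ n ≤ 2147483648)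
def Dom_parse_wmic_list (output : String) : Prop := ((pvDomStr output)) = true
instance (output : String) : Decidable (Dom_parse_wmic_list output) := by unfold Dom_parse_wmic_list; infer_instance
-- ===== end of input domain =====

-- B re-decomposes A's fused accumulator loop into two phases (blank-line block partition, then per-block dict building); same values, same cost.

-- shared helper: line.partition("=") as (before, after) — exact: key = text before the
-- FIRST '=', value = text after it ("" when '=' is absent; both ports only use it when '=' ∈ line)
-- output.split("\n") (sep nonempty, so Python never raises); exact
def pvSplitNL (s : String) : List String := (PySem.Chars.splitOn s.toList ['\n']).map String.ofList

def pvPartEq (s : String) : String × String :=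
  (String.ofList (s.toList.takeWhile (· ≠ '=')), String.ofList ((s.toList.dropWhile (· ≠ '=')).drop 1))

-- shared helper: the body of `if "=" in line: key,_,value = line.partition("="); d[key.strip()] = value.strip()`
def pvStepD (d : PySem.Dict String String) (l : String) : PySem.Dict String String :=
  if PySem.Str.isIn "=" l then
    d.insert (PySem.Str.strip (pvPartEq l).1) (PySem.Str.strip (pvPartEq l).2)
  else d

-- ===== PORT A =====
-- one loop over the lines carrying the state (entries, current)
def pvStepA (st : List (PySem.Dict String String) × PySem.Dict String String) (line : String) :
    List (PySem.Dict String String) × PySem.Dict String String :=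
  let line := PySem.Str.strip line
  if line = "" then
    if st.2.items.isEmpty then st else (st.1 ++ [st.2], PySem.Dict.empty)
  else (st.1, pvStepD st.2 line)

def parse_wmic_list (output : String) : List (List (String × String)) :=
  let st := (pvSplitNL (PySem.Str.strip output)).foldl pvStepA ([], PySem.Dict.empty)
  (if st.2.items.isEmpty then st.1 else st.1 ++ [st.2]).map (·.items)

-- ===== PORT B =====
-- phase 1: partition the stripped lines into blocks separated by blank lines
def pvBlocksGo (cur : List String) : List String → List (List String)
  | [] => [cur]
  | l :: rest => if l = "" then cur :: pvBlocksGo [] rest else pvBlocksGo (cur ++ [l]) rest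

-- phase 2: one block -> dict from its '=' lines
def pvBlockDict (block : List String) : PySem.Dict String String :=
  block.foldl pvStepD PySem.Dict.empty

def parse_wmic_list_alt (output : String) : List (List (String × String)) :=
  let lines := (pvSplitNL (PySem.Str.strip output)).map PySem.Str.strip
  (((pvBlocksGo [] lines).map pvBlockDict).filter (fun d => !d.items.isEmpty)).map (·.items)

-- ===== PRECONDITION & SPEC =====
def Spec_parse_wmic_list (output : String) (out : List (List (String × String))) : Prop := out = parse_wmic_list_alt output
instance (output : String) (out : List (List (String × String))) : Decidable (Spec_parse_wmic_list output out) := by unfold Spec_parse_wmic_list; infer_instance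

-- ===== CLAIM (what is proved, stated in full; the proofs are below) =====
def Claim_equal_parse_wmic_list : Prop := ∀ (output : String), Dom_parse_wmic_list output → Spec_parse_wmic_list output (parse_wmic_list output)

-- ===== LEMMAS AND PROOFS =====

-- common normal form of both programs: remaining stripped lines + the dict of the open block
def pvGo (d : PySem.Dict String String) : List String → List (List (String × String))
  | [] => if d.items.isEmpty then [] else [d.items]
  | l :: rest =>
    if l = "" then
      if d.items.isEmpty then pvGo PySem.Dict.empty rest else d.items :: pvGo PySem.Dict.empty rest
    else pvGo (pvStepD d l) rest

theorem pv_items_nil_eq_empty (d : PySem.Dict String String) (h : d.items.isEmpty = true) :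
    d = PySem.Dict.empty := by
  apply PySem.Dict.ext
  simpa [List.isEmpty_iff] using h

theorem pv_lemA (lines : List String) :
    ∀ (entries : List (PySem.Dict String String)) (d : PySem.Dict String String),
      (let st := lines.foldl pvStepA (entries, d)
       (if st.2.items.isEmpty then st.1 else st.1 ++ [st.2]).map (·.items)) =
      entries.map (·.items) ++ pvGo d (lines.map PySem.Str.strip) := by
  induction lines with
  | nil =>
    intro entries d
    simp only [List.foldl_nil, List.map_nil, pvGo]
    split_ifs <;> simp
  | cons l rest ih =>
    intro entries d
    simp only [List.foldl_cons, List.map_cons, pvGo, pvStepA]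
    by_cases hb : PySem.Str.strip l = ""
    · simp only [hb, if_true]
      by_cases he : d.items.isEmpty
      · simp only [he, if_true]
        rw [ih entries d, pv_items_nil_eq_empty d he]
      · simp only [he, if_false, Bool.false_eq_true, if_false]
        rw [ih (entries ++ [d]) PySem.Dict.empty]
        simp
    · simp only [hb, if_false]
      exact ih entries (pvStepD d (PySem.Str.strip l))

theorem pv_lemB (lines : List String) :
    ∀ (cur : List String),
      (((pvBlocksGo cur lines).map pvBlockDict).filter (fun d => !d.items.isEmpty)).map (·.items) =
      pvGo (pvBlockDict cur) lines := by
  induction lines with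
  | nil =>
    intro cur
    simp only [pvBlocksGo, pvGo, List.map_cons, List.map_nil, List.filter]
    by_cases he : (pvBlockDict cur).items.isEmpty <;> simp [he]
  | cons l rest ih =>
    intro cur
    simp only [pvBlocksGo, pvGo]
    by_cases hb : l = ""
    · simp only [hb, if_true, List.map_cons, List.filter_cons]
      have h0 : pvBlockDict [] = PySem.Dict.empty := rfl
      by_cases he : (pvBlockDict cur).items.isEmpty
      · simp only [he, if_true, Bool.not_true, Bool.false_eq_true, if_false]
        rw [ih [], h0]
      · have he' : (pvBlockDict cur).items.isEmpty = false := by simpa using he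
        simp only [he', Bool.not_false, if_true, Bool.false_eq_true, if_false, List.map_cons]
        rw [ih [], h0]
    · simp only [hb, if_false]
      have : pvBlockDict (cur ++ [l]) = pvStepD (pvBlockDict cur) l := by
        simp [pvBlockDict, List.foldl_append]
      rw [ih (cur ++ [l]), this]

-- ===== VERDICT (by name: the statement is the Claim_ definition above) =====
theorem parse_wmic_list_spec : Claim_equal_parse_wmic_list := by
  intro output _
  show parse_wmic_list output = parse_wmic_list_alt output
  unfold parse_wmic_list parse_wmic_list_alt
  rw [pv_lemA, pv_lemB]
  simp [pvBlockDict]
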